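-- pv_equiv track=rewrite | github.com/lamharrison/rsd-classwork-2019 | 05-testing/times.py | overlap_time
-- ===== SOURCE A (Python) =====
-- def overlap_time(obs1, obs2):
--     ot = []
--     for tr0, tr1 in obs1:
--         for tra, trb in obs2:
--              if tr0 <= tra <= tr1 or tr0 <= trb <= tr1:
--                 low = max(tr0, tra)
--                 high = min(tr1, trb)
--                 if low == high:
--                     # If low and high are equal is that edges are touching
--                     # and we don't want to return such element, continue to
--                     # next element.
--                     continue
--                 ot.append((low, high))
--     return ot
-- ===== SOURCE B (Python) =====
-- def _bisect_left(keys, x):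
--     lo, hi = 0, len(keys)
--     while lo < hi:
--         mid = (lo + hi) // 2
--         if keys[mid] < x:
--             lo = mid + 1
--         else:
--             hi = mid
--     return lo
--
--
-- def _bisect_right(keys, x):
--     lo, hi = 0, len(keys)
--     while lo < hi:
--         mid = (lo + hi) // 2
--         if x < keys[mid]:
--             hi = mid
--         else:
--             lo = mid + 1
--     return lo
--
--
-- def _index_by_key(obs2, key):
--     # (key, index) pairs sorted by key, plus the bare key list for bisecting
--     pairs = sorted(((key(q), j) for j, q in enumerate(obs2)), key=lambda p: p[0])
--     return pairs, [p[0] for p in pairs]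
--
--
-- def _add_window(idxs, pairs, keys, lo, hi):
--     # add the indices of all entries whose key lies in [lo, hi]
--     for k in range(_bisect_left(keys, lo), _bisect_right(keys, hi)):
--         idxs.add(pairs[k][1])
--     return idxs
--
--
-- def overlap_time(obs1, obs2):
--     # Sort obs2's start keys and end keys once (tagged with their index); for
--     # each obs1 interval binary-search the window of obs2 endpoints that fall
--     # inside it, union the matching indices, and emit them in original obs2
--     # order (ascending index), clipped, skipping touching edges.
--     starts, skeys = _index_by_key(obs2, lambda q: q[0])
--     ends, ekeys = _index_by_key(obs2, lambda q: q[1])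
--     out = []
--     for tr0, tr1 in obs1:
--         idxs = _add_window(set(), starts, skeys, tr0, tr1)
--         idxs = _add_window(idxs, ends, ekeys, tr0, tr1)
--         for j in sorted(idxs):
--             tra, trb = obs2[j]
--             low = max(tr0, tra)
--             high = min(tr1, trb)
--             if low != high:
--                 out.append((low, high))
--     return out
-- ===== Notes on version B (the rewrite author's own statement) =====
-- stated objective: alternative
-- what changed: B pre-sorts obs2's start and end keys tagged with their indices, per obs1 interval binary-searches the two key windows, unions the matching indices in a set and emits them in ascending-index order, instead of A's nested linear scan of obs2 for every obs1 interval.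
import Mathlib
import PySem

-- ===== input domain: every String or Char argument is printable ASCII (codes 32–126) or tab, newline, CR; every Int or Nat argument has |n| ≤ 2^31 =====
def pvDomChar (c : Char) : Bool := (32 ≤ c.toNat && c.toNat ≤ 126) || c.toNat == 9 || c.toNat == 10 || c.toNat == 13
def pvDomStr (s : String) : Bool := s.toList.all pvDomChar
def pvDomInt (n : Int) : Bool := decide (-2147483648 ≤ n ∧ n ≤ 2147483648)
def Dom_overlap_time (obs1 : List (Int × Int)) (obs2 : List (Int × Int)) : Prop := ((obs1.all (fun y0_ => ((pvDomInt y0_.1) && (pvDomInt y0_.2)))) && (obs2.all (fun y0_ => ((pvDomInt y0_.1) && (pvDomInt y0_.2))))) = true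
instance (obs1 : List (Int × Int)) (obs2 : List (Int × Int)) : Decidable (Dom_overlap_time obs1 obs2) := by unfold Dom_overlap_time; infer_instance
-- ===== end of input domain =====

-- B replaces A's nested scan by sorted endpoint indexes over obs2 with per-interval binary-searched key
-- windows, unioning the matching indices in a set; alternative algorithm, no speed claim.

-- ===== PORT A =====
def overlap_time (obs1 : List (Int × Int)) (obs2 : List (Int × Int)) : List (Int × Int) :=
  obs1.foldl (fun ot p =>
    obs2.foldl (fun ot q =>
      if (p.1 ≤ q.1 ∧ q.1 ≤ p.2) ∨ (p.1 ≤ q.2 ∧ q.2 ≤ p.2) then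
        if max p.1 q.1 = min p.2 q.2 then ot
        else ot ++ [(max p.1 q.1, min p.2 q.2)]
      else ot) ot) []

-- ===== PORT B =====
-- Source B's hand-written _bisect_left / _bisect_right, ported step for step (lo/hi are the loop locals)
def pvBisectLLoop (keys : List Int) (x : Int) (lo hi : Nat) : Nat :=
  if _h : lo < hi then
    if keys.getD ((lo + hi) / 2) 0 < x then pvBisectLLoop keys x ((lo + hi) / 2 + 1) hi
    else pvBisectLLoop keys x lo ((lo + hi) / 2)
  else lo
termination_by hi - lo
decreasing_by all_goals omega

def pvBisectRLoop (keys : List Int) (x : Int) (lo hi : Nat) : Nat :=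
  if _h : lo < hi then
    if x < keys.getD ((lo + hi) / 2) 0 then pvBisectRLoop keys x lo ((lo + hi) / 2)
    else pvBisectRLoop keys x ((lo + hi) / 2 + 1) hi
  else lo
termination_by hi - lo
decreasing_by all_goals omega

def pvBisectLeft (keys : List Int) (x : Int) : Nat := pvBisectLLoop keys x 0 keys.length
def pvBisectRight (keys : List Int) (x : Int) : Nat := pvBisectRLoop keys x 0 keys.length

-- Source B's _index_by_key: (key, index) pairs sorted by key, plus the bare key list
def pvIndexByKey (obs2 : List (Int × Int)) (key : (Int × Int) → Int) : List (Int × Int) × List Int :=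
  let pairs := PySem.List.sorted ((PySem.List.enumerate obs2).map (fun e => (key e.2, e.1))) (fun r => r.1) false
  (pairs, pairs.map (fun r => r.1))

-- Source B's _add_window: add the indices of all entries whose key lies in [lo, hi]
-- (pairs indexing is always in range by construction, so pyGetD's default is never used)
def pvAddWindow (idxs : PySem.Set Int) (pairs : List (Int × Int)) (keys : List Int) (lo hi : Int) : PySem.Set Int :=
  (PySem.List.pyRange (pvBisectLeft keys lo : Int) (pvBisectRight keys hi : Int) 1).foldl
    (fun s k => PySem.Set.add s (PySem.List.pyGetD pairs k (0, 0)).2) idxs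

def overlap_time_alt (obs1 : List (Int × Int)) (obs2 : List (Int × Int)) : List (Int × Int) :=
  let si := pvIndexByKey obs2 (fun q => q.1)
  let ei := pvIndexByKey obs2 (fun q => q.2)
  obs1.foldl (fun out p =>
    let idxs := pvAddWindow (pvAddWindow PySem.Set.empty si.1 si.2 p.1 p.2) ei.1 ei.2 p.1 p.2
    (PySem.List.sorted idxs (fun j => j) false).foldl (fun out j =>
      let q := PySem.List.pyGetD obs2 j (0, 0)  -- j is a valid index of obs2 by construction
      if max p.1 q.1 ≠ min p.2 q.2 then out ++ [(max p.1 q.1, min p.2 q.2)] else out) out) []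

-- ===== PRECONDITION & SPEC =====
def Spec_overlap_time (obs1 : List (Int × Int)) (obs2 : List (Int × Int)) (out : List (Int × Int)) : Prop := out = overlap_time_alt obs1 obs2
instance (obs1 : List (Int × Int)) (obs2 : List (Int × Int)) (out : List (Int × Int)) : Decidable (Spec_overlap_time obs1 obs2 out) := by unfold Spec_overlap_time; infer_instance

-- ===== CLAIM (what is proved, stated in full; the proofs are below) =====
def Claim_equal_overlap_time : Prop := ∀ (obs1 : List (Int × Int)) (obs2 : List (Int × Int)), Dom_overlap_time obs1 obs2 → Spec_overlap_time obs1 obs2 (overlap_time obs1 obs2)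

-- ===== LEMMAS AND PROOFS =====

-- the per-(obs1-interval) row: matches of obs2 in order, clipped
def pvRow (p : Int × Int) (obs2 : List (Int × Int)) : List (Int × Int) :=
  (obs2.filter (fun q =>
    decide (((p.1 ≤ q.1 ∧ q.1 ≤ p.2) ∨ (p.1 ≤ q.2 ∧ q.2 ≤ p.2)) ∧ max p.1 q.1 ≠ min p.2 q.2))).map
    (fun q => (max p.1 q.1, min p.2 q.2))

-- A's inner loop over obs2 appends exactly pvRow p obs2
lemma inner_eq_row (p : Int × Int) (obs2 : List (Int × Int)) (acc : List (Int × Int)) :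
    obs2.foldl (fun ot q =>
      if (p.1 ≤ q.1 ∧ q.1 ≤ p.2) ∨ (p.1 ≤ q.2 ∧ q.2 ≤ p.2) then
        if max p.1 q.1 = min p.2 q.2 then ot
        else ot ++ [(max p.1 q.1, min p.2 q.2)]
      else ot) acc = acc ++ pvRow p obs2 := by
  have hfun : (fun (ot : List (Int × Int)) q =>
      if (p.1 ≤ q.1 ∧ q.1 ≤ p.2) ∨ (p.1 ≤ q.2 ∧ q.2 ≤ p.2) then
        if max p.1 q.1 = min p.2 q.2 then ot
        else ot ++ [(max p.1 q.1, min p.2 q.2)]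
      else ot) = (fun (ot : List (Int × Int)) (q : Int × Int) =>
      if (((p.1 ≤ q.1 ∧ q.1 ≤ p.2) ∨ (p.1 ≤ q.2 ∧ q.2 ≤ p.2)) ∧ max p.1 q.1 ≠ min p.2 q.2) then
        ot ++ [(max p.1 q.1, min p.2 q.2)] else ot) := by
    funext ot q
    by_cases h1 : (p.1 ≤ q.1 ∧ q.1 ≤ p.2) ∨ (p.1 ≤ q.2 ∧ q.2 ≤ p.2) <;>
      by_cases h2 : max p.1 q.1 = min p.2 q.2 <;> simp [h1, h2]
  rw [hfun, PySem.List.foldl_append_ite, pvRow]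

-- A equals the flattened row map
lemma a_eq_rows (obs1 obs2 : List (Int × Int)) :
    overlap_time obs1 obs2 = (obs1.map (fun p => pvRow p obs2)).flatten := by
  unfold overlap_time
  have : (fun (ot : List (Int × Int)) (p : Int × Int) =>
      obs2.foldl (fun ot q =>
        if (p.1 ≤ q.1 ∧ q.1 ≤ p.2) ∨ (p.1 ≤ q.2 ∧ q.2 ≤ p.2) then
          if max p.1 q.1 = min p.2 q.2 then ot
          else ot ++ [(max p.1 q.1, min p.2 q.2)]
        else ot) ot) = (fun ot p => ot ++ pvRow p obs2) := by
    funext ot p; exact inner_eq_row p obs2 ot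
  rw [this, PySem.List.foldl_append_eq_flatMap]
  simp [List.flatMap_def]

-- invariant of Source B's binary-search loop (_bisect_left)
lemma pvBisectLLoop_inv (a : List Int) (x : Int)
    (hs : a.Pairwise (fun u v => u ≤ v)) :
    ∀ (n lo hi : Nat), hi - lo ≤ n → lo ≤ hi → hi ≤ a.length →
    (∀ k (_hk : k < a.length), k < lo → a[k] < x) →
    (∀ k (_hk : k < a.length), hi ≤ k → x ≤ a[k]) →
    lo ≤ pvBisectLLoop a x lo hi ∧ pvBisectLLoop a x lo hi ≤ hi ∧
    (∀ k (_hk : k < a.length), k < pvBisectLLoop a x lo hi → a[k] < x) ∧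
    (∀ k (_hk : k < a.length), pvBisectLLoop a x lo hi ≤ k → x ≤ a[k]) := by
  have hmono : ∀ (i j : Nat) (_hi : i < a.length) (_hj : j < a.length), i ≤ j → a[i] ≤ a[j] := by
    intro i j hi hj hij
    rcases Nat.lt_or_ge i j with h | h
    · exact List.pairwise_iff_getElem.mp hs i j hi hj h
    · have : i = j := by omega
      subst this; exact le_refl _
  intro n
  induction n with
  | zero =>
    intro lo hi h1 h2 h3 hlo hhi
    have he : lo = hi := by omega
    subst he
    rw [pvBisectLLoop]
    simp only [lt_irrefl, dif_neg, not_false_iff]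
    exact ⟨le_refl _, le_refl _, hlo, fun k hk hle => hhi k hk hle⟩
  | succ n ih =>
    intro lo hi h1 h2 h3 hlo hhi
    by_cases hlt : lo < hi
    · have hmid1 : lo ≤ (lo + hi) / 2 := by omega
      have hmid2 : (lo + hi) / 2 < hi := by omega
      have hmidlen : (lo + hi) / 2 < a.length := by omega
      rw [pvBisectLLoop]
      rw [dif_pos hlt]
      have hget : a.getD ((lo + hi) / 2) 0 = a[(lo + hi) / 2] := List.getD_eq_getElem a 0 hmidlen
      by_cases hc : a.getD ((lo + hi) / 2) 0 < x
      · rw [if_pos hc]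
        rw [hget] at hc
        have hres := ih ((lo + hi) / 2 + 1) hi (by omega) (by omega) h3
          (fun k hk hklt => by
            rcases Nat.lt_or_ge k ((lo + hi) / 2) with h | h
            · exact lt_of_le_of_lt (hmono k _ hk hmidlen (by omega)) hc
            · have : k = (lo + hi) / 2 := by omega
              subst this; exact hc) hhi
        exact ⟨le_trans (by omega) hres.1, hres.2.1, hres.2.2.1, hres.2.2.2⟩
      · rw [if_neg hc]
        rw [hget] at hc
        have hc' : x ≤ a[(lo + hi) / 2] := not_lt.mp hc
        have hres := ih lo ((lo + hi) / 2) (by omega) (by omega) (by omega) hlo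
          (fun k hk hge => le_trans hc' (hmono _ k hmidlen hk hge))
        exact ⟨hres.1, le_trans hres.2.1 (by omega), hres.2.2.1, hres.2.2.2⟩
    · rw [pvBisectLLoop]
      rw [dif_neg hlt]
      exact ⟨le_refl _, h2, hlo, fun k hk hle => hhi k hk (by omega)⟩

lemma pvBisectRLoop_inv (a : List Int) (x : Int)
    (hs : a.Pairwise (fun u v => u ≤ v)) :
    ∀ (n lo hi : Nat), hi - lo ≤ n → lo ≤ hi → hi ≤ a.length →
    (∀ k (_hk : k < a.length), k < lo → a[k] ≤ x) →
    (∀ k (_hk : k < a.length), hi ≤ k → x < a[k]) →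
    lo ≤ pvBisectRLoop a x lo hi ∧ pvBisectRLoop a x lo hi ≤ hi ∧
    (∀ k (_hk : k < a.length), k < pvBisectRLoop a x lo hi → a[k] ≤ x) ∧
    (∀ k (_hk : k < a.length), pvBisectRLoop a x lo hi ≤ k → x < a[k]) := by
  have hmono : ∀ (i j : Nat) (_hi : i < a.length) (_hj : j < a.length), i ≤ j → a[i] ≤ a[j] := by
    intro i j hi hj hij
    rcases Nat.lt_or_ge i j with h | h
    · exact List.pairwise_iff_getElem.mp hs i j hi hj h
    · have : i = j := by omega
      subst this; exact le_refl _
  intro n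
  induction n with
  | zero =>
    intro lo hi h1 h2 h3 hlo hhi
    have he : lo = hi := by omega
    subst he
    rw [pvBisectRLoop]
    simp only [lt_irrefl, dif_neg, not_false_iff]
    exact ⟨le_refl _, le_refl _, hlo, fun k hk hle => hhi k hk hle⟩
  | succ n ih =>
    intro lo hi h1 h2 h3 hlo hhi
    by_cases hlt : lo < hi
    · have hmid1 : lo ≤ (lo + hi) / 2 := by omega
      have hmid2 : (lo + hi) / 2 < hi := by omega
      have hmidlen : (lo + hi) / 2 < a.length := by omega
      rw [pvBisectRLoop]
      rw [dif_pos hlt]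
      have hget : a.getD ((lo + hi) / 2) 0 = a[(lo + hi) / 2] := List.getD_eq_getElem a 0 hmidlen
      by_cases hc : x < a.getD ((lo + hi) / 2) 0
      · rw [if_pos hc]
        rw [hget] at hc
        have hres := ih lo ((lo + hi) / 2) (by omega) (by omega) (by omega) hlo
          (fun k hk hge => lt_of_lt_of_le hc (hmono _ k hmidlen hk hge))
        exact ⟨hres.1, le_trans hres.2.1 (by omega), hres.2.2.1, hres.2.2.2⟩
      · rw [if_neg hc]
        rw [hget] at hc
        have hc' : a[(lo + hi) / 2] ≤ x := not_lt.mp hc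
        have hres := ih ((lo + hi) / 2 + 1) hi (by omega) (by omega) h3
          (fun k hk hklt => by
            rcases Nat.lt_or_ge k ((lo + hi) / 2) with h | h
            · exact le_trans (hmono k _ hk hmidlen (by omega)) hc'
            · have : k = (lo + hi) / 2 := by omega
              subst this; exact hc') hhi
        exact ⟨le_trans (by omega) hres.1, hres.2.1, hres.2.2.1, hres.2.2.2⟩
    · rw [pvBisectRLoop]
      rw [dif_neg hlt]
      exact ⟨le_refl _, h2, hlo, fun k hk hle => hhi k hk (by omega)⟩

-- the bisected window of a key-sorted pair list is exactly "key in [lo, hi]"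
lemma pvWindow_iff (st : List (Int × Int)) (lo hi : Int)
    (hs : (st.map (fun r => r.1)).Pairwise (fun u v => u ≤ v)) :
    pvBisectRight (st.map (fun r => r.1)) hi ≤ st.length ∧
    (∀ (k : Nat) (_hk : k < st.length),
      (pvBisectLeft (st.map (fun r => r.1)) lo ≤ k ∧ k < pvBisectRight (st.map (fun r => r.1)) hi)
        ↔ (lo ≤ st[k].1 ∧ st[k].1 ≤ hi)) := by
  have hlen : (st.map (fun r => r.1)).length = st.length := List.length_map ..
  have hL := pvBisectLLoop_inv (st.map (fun r => r.1)) lo hs (st.map (fun r => r.1)).length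
    0 (st.map (fun r => r.1)).length (by omega) (by omega) le_rfl
    (fun k hk h => absurd h (by omega)) (fun k hk h => absurd hk (by omega))
  have hR := pvBisectRLoop_inv (st.map (fun r => r.1)) hi hs (st.map (fun r => r.1)).length
    0 (st.map (fun r => r.1)).length (by omega) (by omega) le_rfl
    (fun k hk h => absurd h (by omega)) (fun k hk h => absurd hk (by omega))
  have hgm : ∀ (k : Nat) (hk : k < st.length),
      (st.map (fun r => r.1))[k]'(by omega) = st[k].1 := by
    intro k hk; simp
  refine ⟨by rw [pvBisectRight]; exact hlen ▸ hR.2.1, ?_⟩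
  intro k hk
  constructor
  · intro ⟨h1, h2⟩
    refine ⟨?_, ?_⟩
    · have := hL.2.2.2 k (by omega) (by rwa [pvBisectLeft] at h1)
      rwa [hgm k hk] at this
    · have := hR.2.2.1 k (by omega) (by rwa [pvBisectRight] at h2)
      rwa [hgm k hk] at this
  · intro ⟨h1, h2⟩
    constructor
    · by_contra h'
      rw [pvBisectLeft] at h'
      have := hL.2.2.1 k (by omega) (by omega)
      rw [hgm k hk] at this; omega
    · by_contra h'
      rw [pvBisectRight] at h'
      have := hR.2.2.2 k (by omega) (by omega)
      rw [hgm k hk] at this; omega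

-- set membership through an index-collecting fold
lemma mem_foldl_add (l : List Int) (f : Int → Int) (s : PySem.Set Int) (i : Int) :
    i ∈ l.foldl (fun s k => PySem.Set.add s (f k)) s ↔ i ∈ s ∨ ∃ k ∈ l, f k = i := by
  induction l generalizing s with
  | nil => simp
  | cons a t ih =>
    simp only [List.foldl_cons, ih, PySem.Set.mem_add, List.mem_cons]
    constructor
    · rintro ((h | h) | ⟨k, hk, hfk⟩)
      · exact Or.inl h
      · exact Or.inr ⟨a, Or.inl rfl, h.symm⟩
      · exact Or.inr ⟨k, Or.inr hk, hfk⟩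
    · rintro (h | ⟨k, (rfl | hk), hfk⟩)
      · exact Or.inl (Or.inl h)
      · exact Or.inl (Or.inr hfk.symm)
      · exact Or.inr ⟨k, hk, hfk⟩

lemma nodup_foldl_add (l : List Int) (f : Int → Int) (s : PySem.Set Int) (h : s.Nodup) :
    (l.foldl (fun s k => PySem.Set.add s (f k)) s).Nodup := by
  induction l generalizing s with
  | nil => exact h
  | cons a t ih => exact ih _ (PySem.Set.nodup_add _ _ h)

-- membership in the indices collected from one window
lemma mem_addWindow (idxs : PySem.Set Int) (st : List (Int × Int)) (lo hi : Int)
    (hs : (st.map (fun r => r.1)).Pairwise (fun u v => u ≤ v)) (i : Int) :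
    i ∈ pvAddWindow idxs st (st.map (fun r => r.1)) lo hi ↔
      i ∈ idxs ∨ ∃ pr ∈ st, pr.2 = i ∧ lo ≤ pr.1 ∧ pr.1 ≤ hi := by
  obtain ⟨hRlen, hwin⟩ := pvWindow_iff st lo hi hs
  unfold pvAddWindow
  rw [mem_foldl_add]
  apply or_congr Iff.rfl
  constructor
  · rintro ⟨k, hk, hfk⟩
    rw [PySem.List.mem_pyRange_one] at hk
    have h0 : (0 : Int) ≤ k := le_trans (Int.natCast_nonneg _) hk.1
    have hkR : k.toNat < pvBisectRight (st.map (fun r => r.1)) hi := by omega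
    have hkL : pvBisectLeft (st.map (fun r => r.1)) lo ≤ k.toNat := by omega
    have hklen : k.toNat < st.length := by omega
    have hget : PySem.List.pyGetD st k ((0 : Int), (0 : Int)) = st[k.toNat] :=
      PySem.List.pyGetD_eq_getElem st _ h0 (by omega)
    have hw := (hwin k.toNat hklen).mp ⟨hkL, hkR⟩
    exact ⟨st[k.toNat], List.getElem_mem _, by rw [← hfk, hget], hw.1, hw.2⟩
  · rintro ⟨pr, hpr, hpr2, hwlo, hwhi⟩
    obtain ⟨kn, hkn, hknEq⟩ := List.mem_iff_getElem.mp hpr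
    subst hknEq
    have hw := (hwin kn hkn).mpr ⟨hwlo, hwhi⟩
    refine ⟨(kn : Int), ?_, ?_⟩
    · rw [PySem.List.mem_pyRange_one]
      exact ⟨by exact_mod_cast hw.1, by exact_mod_cast hw.2⟩
    · rw [PySem.List.pyGetD_eq_getElem st _ (Int.natCast_nonneg _) (by exact_mod_cast hkn)]
      simpa using hpr2

-- membership in an index-by-key pair list
lemma mem_indexByKey (obs2 : List (Int × Int)) (f : (Int × Int) → Int) (pr : Int × Int) :
    pr ∈ (pvIndexByKey obs2 f).1 ↔
      ∃ (k : Nat) (h : k < obs2.length), pr = (f obs2[k], (k : Int)) := by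
  simp only [pvIndexByKey]
  rw [PySem.List.mem_sorted, List.mem_map]
  constructor
  · rintro ⟨e, he, rfl⟩
    obtain ⟨k, hk, rfl⟩ := (PySem.List.mem_enumerate_iff obs2 0 e).mp he
    exact ⟨k, hk, by simp⟩
  · rintro ⟨k, hk, rfl⟩
    exact ⟨((k : Int), obs2[k]), (PySem.List.mem_enumerate_iff obs2 0 _).mpr ⟨k, hk, by simp⟩, rfl⟩

lemma indexByKey_snd (obs2 : List (Int × Int)) (f : (Int × Int) → Int) :
    (pvIndexByKey obs2 f).2 = (pvIndexByKey obs2 f).1.map (fun r => r.1) := rfl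

lemma indexByKey_pairwise (obs2 : List (Int × Int)) (f : (Int × Int) → Int) :
    ((pvIndexByKey obs2 f).1.map (fun r => r.1)).Pairwise (fun u v => u ≤ v) :=
  PySem.List.sorted_map_key_pairwise _ _

-- the collected index set has no duplicates
lemma idxs_nodup (obs2 : List (Int × Int)) (p : Int × Int) :
    pvAddWindow (pvAddWindow PySem.Set.empty (pvIndexByKey obs2 (fun q => q.1)).1 (pvIndexByKey obs2 (fun q => q.1)).2 p.1 p.2)
      (pvIndexByKey obs2 (fun q => q.2)).1 (pvIndexByKey obs2 (fun q => q.2)).2 p.1 p.2 |>.Nodup := by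
  unfold pvAddWindow
  exact nodup_foldl_add _ _ _ (nodup_foldl_add _ _ _ List.nodup_nil)

-- membership in the collected index set: exactly the matching obs2 indices
lemma mem_idxs_iff (obs2 : List (Int × Int)) (p : Int × Int) (i : Int) :
    i ∈ pvAddWindow (pvAddWindow PySem.Set.empty (pvIndexByKey obs2 (fun q => q.1)).1 (pvIndexByKey obs2 (fun q => q.1)).2 p.1 p.2)
      (pvIndexByKey obs2 (fun q => q.2)).1 (pvIndexByKey obs2 (fun q => q.2)).2 p.1 p.2 ↔
    ∃ (k : Nat) (h : k < obs2.length), i = (k : Int) ∧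
      ((p.1 ≤ obs2[k].1 ∧ obs2[k].1 ≤ p.2) ∨ (p.1 ≤ obs2[k].2 ∧ obs2[k].2 ≤ p.2)) := by
  rw [indexByKey_snd obs2 (fun q => q.1), indexByKey_snd obs2 (fun q => q.2)]
  rw [mem_addWindow _ _ _ _ (indexByKey_pairwise obs2 (fun q => q.2)),
      mem_addWindow _ _ _ _ (indexByKey_pairwise obs2 (fun q => q.1))]
  simp only [PySem.Set.empty, List.not_mem_nil, false_or]
  constructor
  · rintro (⟨pr, hpr, hpr2, hw1, hw2⟩ | ⟨pr, hpr, hpr2, hw1, hw2⟩)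
    · obtain ⟨k, hk, rfl⟩ := (mem_indexByKey obs2 (fun q => q.1) pr).mp hpr
      exact ⟨k, hk, hpr2.symm, Or.inl ⟨hw1, hw2⟩⟩
    · obtain ⟨k, hk, rfl⟩ := (mem_indexByKey obs2 (fun q => q.2) pr).mp hpr
      exact ⟨k, hk, hpr2.symm, Or.inr ⟨hw1, hw2⟩⟩
  · rintro ⟨k, hk, rfl, (⟨h1, h2⟩ | ⟨h1, h2⟩)⟩
    · exact Or.inl ⟨(obs2[k].1, (k : Int)),
        (mem_indexByKey obs2 (fun q => q.1) _).mpr ⟨k, hk, rfl⟩, rfl, h1, h2⟩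
    · exact Or.inr ⟨(obs2[k].2, (k : Int)),
        (mem_indexByKey obs2 (fun q => q.2) _).mpr ⟨k, hk, rfl⟩, rfl, h1, h2⟩

-- membership in the filtered index range
lemma mem_range_filter_iff (obs2 : List (Int × Int)) (p : Int × Int) (j : Int) :
    j ∈ (PySem.List.pyRange 0 (obs2.length : Int) 1).filter
        (fun j => decide ((p.1 ≤ (PySem.List.pyGetD obs2 j ((0 : Int), (0 : Int))).1 ∧ (PySem.List.pyGetD obs2 j ((0 : Int), (0 : Int))).1 ≤ p.2) ∨
                          (p.1 ≤ (PySem.List.pyGetD obs2 j ((0 : Int), (0 : Int))).2 ∧ (PySem.List.pyGetD obs2 j ((0 : Int), (0 : Int))).2 ≤ p.2))) ↔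
    ∃ (k : Nat) (h : k < obs2.length), j = (k : Int) ∧
      ((p.1 ≤ obs2[k].1 ∧ obs2[k].1 ≤ p.2) ∨ (p.1 ≤ obs2[k].2 ∧ obs2[k].2 ≤ p.2)) := by
  simp only [List.mem_filter, PySem.List.mem_pyRange_one, decide_eq_true_eq]
  constructor
  · rintro ⟨⟨h0, hm⟩, hcond⟩
    refine ⟨j.toNat, by omega, by omega, ?_⟩
    rwa [PySem.List.pyGetD_eq_getElem obs2 _ h0 (by omega)] at hcond
  · rintro ⟨k, hk, rfl, hcond⟩
    refine ⟨⟨Int.natCast_nonneg _, by exact_mod_cast hk⟩, ?_⟩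
    rw [PySem.List.pyGetD_eq_getElem obs2 _ (Int.natCast_nonneg _) (by exact_mod_cast hk)]
    simpa using hcond

-- the sorted index set is exactly the filtered index range
lemma sorted_idxs_eq (obs2 : List (Int × Int)) (p : Int × Int) :
    PySem.List.sorted
      (pvAddWindow (pvAddWindow PySem.Set.empty (pvIndexByKey obs2 (fun q => q.1)).1 (pvIndexByKey obs2 (fun q => q.1)).2 p.1 p.2)
        (pvIndexByKey obs2 (fun q => q.2)).1 (pvIndexByKey obs2 (fun q => q.2)).2 p.1 p.2)
      (fun j => j) false
    = (PySem.List.pyRange 0 (obs2.length : Int) 1).filter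
        (fun j => decide ((p.1 ≤ (PySem.List.pyGetD obs2 j ((0 : Int), (0 : Int))).1 ∧ (PySem.List.pyGetD obs2 j ((0 : Int), (0 : Int))).1 ≤ p.2) ∨
                          (p.1 ≤ (PySem.List.pyGetD obs2 j ((0 : Int), (0 : Int))).2 ∧ (PySem.List.pyGetD obs2 j ((0 : Int), (0 : Int))).2 ≤ p.2))) := by
  apply PySem.List.sorted_eq_of_perm_of_pairwise_lt
  · have hT : ((PySem.List.pyRange 0 (obs2.length : Int) 1).filter
        (fun j => decide ((p.1 ≤ (PySem.List.pyGetD obs2 j ((0 : Int), (0 : Int))).1 ∧ (PySem.List.pyGetD obs2 j ((0 : Int), (0 : Int))).1 ≤ p.2) ∨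
                          (p.1 ≤ (PySem.List.pyGetD obs2 j ((0 : Int), (0 : Int))).2 ∧ (PySem.List.pyGetD obs2 j ((0 : Int), (0 : Int))).2 ≤ p.2)))).Nodup :=
      ((PySem.List.pairwise_lt_pyRange_one 0 (obs2.length : Int)).filter _).imp (fun h => ne_of_lt h)
    refine (List.perm_ext_iff_of_nodup hT (idxs_nodup obs2 p)).mpr (fun j => ?_)
    rw [mem_range_filter_iff, mem_idxs_iff]
  · exact (PySem.List.pairwise_lt_pyRange_one 0 (obs2.length : Int)).filter _

-- B's inner loop appends exactly pvRow p obs2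
lemma b_inner_eq_row (obs2 : List (Int × Int)) (p : Int × Int) (out : List (Int × Int)) :
    (PySem.List.sorted
      (pvAddWindow (pvAddWindow PySem.Set.empty (pvIndexByKey obs2 (fun q => q.1)).1 (pvIndexByKey obs2 (fun q => q.1)).2 p.1 p.2)
        (pvIndexByKey obs2 (fun q => q.2)).1 (pvIndexByKey obs2 (fun q => q.2)).2 p.1 p.2)
      (fun j => j) false).foldl (fun out j =>
        if max p.1 (PySem.List.pyGetD obs2 j ((0 : Int), (0 : Int))).1 ≠ min p.2 (PySem.List.pyGetD obs2 j ((0 : Int), (0 : Int))).2 then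
          out ++ [(max p.1 (PySem.List.pyGetD obs2 j ((0 : Int), (0 : Int))).1, min p.2 (PySem.List.pyGetD obs2 j ((0 : Int), (0 : Int))).2)]
        else out) out
    = out ++ pvRow p obs2 := by
  rw [sorted_idxs_eq, PySem.List.foldl_append_ite
    (p := fun j => max p.1 (PySem.List.pyGetD obs2 j ((0 : Int), (0 : Int))).1 ≠ min p.2 (PySem.List.pyGetD obs2 j ((0 : Int), (0 : Int))).2)
    (f := fun j => (max p.1 (PySem.List.pyGetD obs2 j ((0 : Int), (0 : Int))).1, min p.2 (PySem.List.pyGetD obs2 j ((0 : Int), (0 : Int))).2))]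
  congr 1
  rw [List.filter_filter]
  have h1 : ((PySem.List.pyRange 0 (obs2.length : Int) 1).filter
      (fun j => decide (max p.1 (PySem.List.pyGetD obs2 j ((0 : Int), (0 : Int))).1 ≠ min p.2 (PySem.List.pyGetD obs2 j ((0 : Int), (0 : Int))).2) &&
                decide ((p.1 ≤ (PySem.List.pyGetD obs2 j ((0 : Int), (0 : Int))).1 ∧ (PySem.List.pyGetD obs2 j ((0 : Int), (0 : Int))).1 ≤ p.2) ∨
                        (p.1 ≤ (PySem.List.pyGetD obs2 j ((0 : Int), (0 : Int))).2 ∧ (PySem.List.pyGetD obs2 j ((0 : Int), (0 : Int))).2 ≤ p.2))))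
      = ((PySem.List.pyRange 0 (obs2.length : Int) 1).filter
          ((fun q : Int × Int =>
            decide (((p.1 ≤ q.1 ∧ q.1 ≤ p.2) ∨ (p.1 ≤ q.2 ∧ q.2 ≤ p.2)) ∧ max p.1 q.1 ≠ min p.2 q.2)) ∘
           (fun j => PySem.List.pyGetD obs2 j ((0 : Int), (0 : Int))))) := by
    apply List.filter_congr
    intro a _
    simp only [Function.comp_apply]
    rw [Bool.and_comm, Bool.decide_and]
  rw [h1]
  rw [show (fun j => (max p.1 (PySem.List.pyGetD obs2 j ((0 : Int), (0 : Int))).1, min p.2 (PySem.List.pyGetD obs2 j ((0 : Int), (0 : Int))).2))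
        = ((fun q : Int × Int => (max p.1 q.1, min p.2 q.2)) ∘ (fun j => PySem.List.pyGetD obs2 j ((0 : Int), (0 : Int)))) from rfl]
  rw [← List.map_map, ← List.filter_map, PySem.List.map_pyGetD_pyRange_zero']
  rfl

-- B equals the flattened row map
lemma b_eq_rows (obs1 obs2 : List (Int × Int)) :
    overlap_time_alt obs1 obs2 = (obs1.map (fun p => pvRow p obs2)).flatten := by
  simp only [overlap_time_alt]
  have : (fun (out : List (Int × Int)) (p : Int × Int) =>
      (PySem.List.sorted
        (pvAddWindow (pvAddWindow PySem.Set.empty (pvIndexByKey obs2 (fun q => q.1)).1 (pvIndexByKey obs2 (fun q => q.1)).2 p.1 p.2)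
          (pvIndexByKey obs2 (fun q => q.2)).1 (pvIndexByKey obs2 (fun q => q.2)).2 p.1 p.2)
        (fun j => j) false).foldl (fun out j =>
          if max p.1 (PySem.List.pyGetD obs2 j ((0 : Int), (0 : Int))).1 ≠ min p.2 (PySem.List.pyGetD obs2 j ((0 : Int), (0 : Int))).2 then
            out ++ [(max p.1 (PySem.List.pyGetD obs2 j ((0 : Int), (0 : Int))).1, min p.2 (PySem.List.pyGetD obs2 j ((0 : Int), (0 : Int))).2)]
          else out) out)
      = (fun out p => out ++ pvRow p obs2) := by
    funext out p; exact b_inner_eq_row obs2 p out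
  rw [this, PySem.List.foldl_append_eq_flatMap]
  simp [List.flatMap_def]

-- ===== VERDICT (by name: the statement is the Claim_ definition above) =====
theorem overlap_time_spec : Claim_equal_overlap_time := by
  intro obs1 obs2 _
  unfold Spec_overlap_time
  rw [a_eq_rows, b_eq_rows]
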